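-- pv_equiv track=rewrite | github.com/MIchael-wufan/shushi | division_vertical_mcp/compose.py | _dividend_cells_shifted_digits
-- ===== SOURCE A (Python) =====
-- def _dividend_cells_shifted_digits(ds: str, dec_after: int, extra_trailing_zeros: int) -> list[str]:
--     """竖式内被除数行：移位后的数字串 + 小数点（整数被除数不画末尾点）。"""
--     body = ds + ("0" * extra_trailing_zeros)
--     if dec_after >= len(ds) and extra_trailing_zeros == 0:
--         return list(body)
--     cells: list[str] = []
--     for j, ch in enumerate(body):
--         if j == dec_after:
--             cells.append(".")
--         cells.append(ch)
--     return cells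
-- ===== SOURCE B (Python) =====
-- def _dividend_cells_shifted_digits(ds: str, dec_after: int, extra_trailing_zeros: int) -> list[str]:
--     body = ds + "0" * extra_trailing_zeros
--     if 0 <= dec_after < len(body):
--         return list(body[:dec_after]) + ["."] + list(body[dec_after:])
--     return list(body)
-- ===== Notes on version B (the rewrite author's own statement) =====
-- stated objective: simpler
-- what changed: Replaces the char-by-char enumerate loop (and A's redundant integer-dividend shortcut branch) with a single boundary test and a slice-split insertion of the dot.
import Mathlib
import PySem

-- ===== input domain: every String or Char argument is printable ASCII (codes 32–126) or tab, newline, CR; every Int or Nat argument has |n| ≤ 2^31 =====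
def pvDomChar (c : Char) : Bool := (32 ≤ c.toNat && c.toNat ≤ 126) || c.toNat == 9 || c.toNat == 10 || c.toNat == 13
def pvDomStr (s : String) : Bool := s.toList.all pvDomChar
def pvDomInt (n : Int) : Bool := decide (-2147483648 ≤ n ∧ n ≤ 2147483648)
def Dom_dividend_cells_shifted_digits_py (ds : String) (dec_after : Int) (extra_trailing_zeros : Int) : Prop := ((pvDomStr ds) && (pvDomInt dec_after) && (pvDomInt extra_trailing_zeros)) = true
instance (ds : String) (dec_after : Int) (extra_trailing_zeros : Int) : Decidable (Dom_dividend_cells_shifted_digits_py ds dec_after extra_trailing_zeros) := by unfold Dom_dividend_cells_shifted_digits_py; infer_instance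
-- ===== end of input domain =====

-- ===== PORT A =====
-- Port of _dividend_cells_shifted_digits: body = ds + "0"*extra; special integer-dividend
-- branch returns list(body); otherwise an enumerate loop appending "." before index dec_after.
def pvStr1 (c : Char) : String := String.mk [c]

def dividend_cells_shifted_digits_py (ds : String) (dec_after : Int) (extra_trailing_zeros : Int) : List String :=
  let body : List Char := ds.toList ++ List.replicate extra_trailing_zeros.toNat '0'
  if dec_after ≥ (ds.toList.length : Int) ∧ extra_trailing_zeros = 0 then
    body.map pvStr1
  else
    (PySem.List.enumerate body).foldl
      (fun cells jc => (if jc.1 = dec_after then cells ++ ["."] else cells) ++ [pvStr1 jc.2]) []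

-- ===== PORT B =====
-- B: one boundary test; the dot is inserted by splitting body with slices.
def dividend_cells_shifted_digits_py_alt (ds : String) (dec_after : Int) (extra_trailing_zeros : Int) : List String :=
  let body : List Char := ds.toList ++ List.replicate extra_trailing_zeros.toNat '0'
  if 0 ≤ dec_after ∧ dec_after < (body.length : Int) then
    (PySem.List.slice body none (some dec_after)).map pvStr1 ++ ["."] ++
      (PySem.List.slice body (some dec_after) none).map pvStr1
  else
    body.map pvStr1

-- ===== PRECONDITION & SPEC =====
def Spec_dividend_cells_shifted_digits_py (ds : String) (dec_after : Int) (extra_trailing_zeros : Int) (out : List String) : Prop := out = dividend_cells_shifted_digits_py_alt ds dec_after extra_trailing_zeros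
instance (ds : String) (dec_after : Int) (extra_trailing_zeros : Int) (out : List String) : Decidable (Spec_dividend_cells_shifted_digits_py ds dec_after extra_trailing_zeros out) := by unfold Spec_dividend_cells_shifted_digits_py; infer_instance

-- ===== CLAIM (what is proved, stated in full; the proofs are below) =====
def Claim_equal_dividend_cells_shifted_digits_py : Prop := ∀ (ds : String) (dec_after : Int) (extra_trailing_zeros : Int), Dom_dividend_cells_shifted_digits_py ds dec_after extra_trailing_zeros → Spec_dividend_cells_shifted_digits_py ds dec_after extra_trailing_zeros (dividend_cells_shifted_digits_py ds dec_after extra_trailing_zeros)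

-- ===== LEMMAS AND PROOFS =====
-- A's enumerate loop, characterised: it inserts "." exactly when s ≤ d < s + length.
theorem pvLoop_eq (l : List Char) : ∀ (s d : Int) (acc : List String),
    (PySem.List.enumerate l s).foldl
      (fun cells jc => (if jc.1 = d then cells ++ ["."] else cells) ++ [pvStr1 jc.2]) acc
    = acc ++ (if s ≤ d ∧ d < s + (l.length : Int) then
        (l.take (d - s).toNat).map pvStr1 ++ "." :: (l.drop (d - s).toNat).map pvStr1
      else l.map pvStr1) := by
  induction l with
  | nil =>
      intro s d acc
      simp only [List.length_nil, Nat.cast_zero]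
      rw [if_neg (by omega)]
      simp [PySem.List.enumerate]
  | cons c l ih =>
      intro s d acc
      simp only [List.length_cons, Nat.cast_add, Nat.cast_one]
      rw [PySem.List.enumerate_cons, List.foldl_cons]
      by_cases h : s = d
      · rw [if_pos h, ih]
        rw [if_neg (by omega), if_pos (by constructor <;> omega)]
        have : (d - s).toNat = 0 := by omega
        simp [this]
      · rw [if_neg h, ih]
        by_cases h2 : s + 1 ≤ d ∧ d < s + 1 + (l.length : Int)
        · rw [if_pos h2, if_pos (by omega)]
          have hk : (d - s).toNat = (d - (s + 1)).toNat + 1 := by omega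
          simp [hk]
        · rw [if_neg h2, if_neg (by omega)]
          simp

-- ===== VERDICT (by name: the statement is the Claim_ definition above) =====
theorem dividend_cells_shifted_digits_py_spec : Claim_equal_dividend_cells_shifted_digits_py := by
  intro ds d e _
  unfold Spec_dividend_cells_shifted_digits_py dividend_cells_shifted_digits_py
    dividend_cells_shifted_digits_py_alt
  simp only []
  set body : List Char := ds.toList ++ List.replicate e.toNat '0' with hbody
  by_cases hA : d ≥ (ds.toList.length : Int) ∧ e = 0
  · -- A's shortcut: no dot either way
    rw [if_pos hA]
    have hb : body = ds.toList := by
      rw [hbody, hA.2]; simp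
    rw [if_neg (by rw [hb]; omega)]
  · rw [if_neg hA, pvLoop_eq]
    by_cases h : 0 ≤ d ∧ d < (body.length : Int)
    · rw [if_pos (by omega), if_pos h,
        PySem.List.slice_to body h.1, PySem.List.slice_from body h.1]
      simp
    · rw [if_neg (by omega), if_neg h]
      simp
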